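-- pv_equiv track=rewrite | github.com/DutchGhost/Iscip | python/week5/pascal.py | vierkant
-- ===== SOURCE A (Python) =====
-- def vierkant(m, n=1):
--     results = []
--     for y in range(m):
--         row = []
--         for x in range(m):
--             if x == 0 or y == 0:
--                 row.append(n)
--             else:
--                 row.append(results[y - 1][x] + row[x - 1])
--         results.append(row)
--     return results
-- ===== SOURCE B (Python) =====
-- def vierkant(m, n=1):
--     # Each cell (y, x) is n * C(x+y, x); build each row with a running
--     # multiplicative binomial update instead of referencing the previous row.
--     results = []
--     for y in range(m):
--         row = [n]
--         val = n
--         for x in range(1, m):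
--             val = val * (x + y) // x
--             row.append(val)
--         results.append(row)
--     return results
-- ===== Notes on version B (the rewrite author's own statement) =====
-- stated objective: simpler
-- what changed: B replaces A's DP that adds the previous row's cell and the previous cell via list indexing by a per-row running multiplicative binomial update (cell (y,x) = n*C(x+y,x)), so no reference to earlier rows is kept.
import Mathlib
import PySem

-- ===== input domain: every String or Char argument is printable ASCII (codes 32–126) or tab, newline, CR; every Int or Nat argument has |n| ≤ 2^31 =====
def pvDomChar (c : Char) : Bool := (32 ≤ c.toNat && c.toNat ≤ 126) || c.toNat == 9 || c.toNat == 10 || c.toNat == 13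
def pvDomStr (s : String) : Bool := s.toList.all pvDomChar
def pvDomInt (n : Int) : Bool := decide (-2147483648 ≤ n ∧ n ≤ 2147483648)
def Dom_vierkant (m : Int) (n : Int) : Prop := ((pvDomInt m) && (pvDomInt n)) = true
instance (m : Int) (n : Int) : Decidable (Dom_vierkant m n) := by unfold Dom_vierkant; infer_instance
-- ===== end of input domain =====

-- B replaces A's previous-row DP by a per-row running multiplicative binomial update (cell (y,x) = n*C(x+y,x)); objective: simpler (each row self-contained).

-- ===== PORT A =====
-- A's indexing results[y-1][x] / row[x-1] is always in range when reached; pyGetD's default is never used.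
def vierkant (m : Int) (n : Int) : List (List Int) :=
  (PySem.List.pyRange 0 m 1).foldl (fun results y =>
    results ++ [(PySem.List.pyRange 0 m 1).foldl (fun row x =>
      row ++ [if x = 0 ∨ y = 0 then n
              else PySem.List.pyGetD (PySem.List.pyGetD results (y - 1) []) x 0
                   + PySem.List.pyGetD row (x - 1) 0]) ([] : List Int)]) []

-- ===== PORT B =====
def vierkant_alt (m : Int) (n : Int) : List (List Int) :=
  (PySem.List.pyRange 0 m 1).map (fun y =>
    ((PySem.List.pyRange 1 m 1).foldl
      (fun (st : List Int × Int) x =>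
        let v := PySem.Int.floordiv (st.2 * (x + y)) x
        (st.1 ++ [v], v))
      ([n], n)).1)

-- ===== PRECONDITION & SPEC =====
def Spec_vierkant (m : Int) (n : Int) (out : List (List Int)) : Prop := out = vierkant_alt m n
instance (m : Int) (n : Int) (out : List (List Int)) : Decidable (Spec_vierkant m n out) := by unfold Spec_vierkant; infer_instance

-- ===== CLAIM (what is proved, stated in full; the proofs are below) =====
def Claim_equal_vierkant : Prop := ∀ (m : Int) (n : Int), Dom_vierkant m n → Spec_vierkant m n (vierkant m n)

-- ===== LEMMAS AND PROOFS =====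

-- the common closed form: cell (y,x) = n * C(x+y, x)
def pvCell (n : Int) (y x : Nat) : Int := n * ((x + y).choose x : Int)

def pvRow (M : Nat) (n : Int) (y : Nat) : List Int := (List.range M).map (pvCell n y)

theorem pvCell_zero_right (n : Int) (y : Nat) : pvCell n y 0 = n := by
  simp [pvCell]

theorem pvCell_zero_left (n : Int) (x : Nat) : pvCell n 0 x = n := by
  simp [pvCell]

-- Pascal's rule for cells
theorem pvCell_pascal (n : Int) (j i : Nat) (hj : 1 ≤ j) (hi : 1 ≤ i) :
    pvCell n j i = pvCell n (j - 1) i + pvCell n j (i - 1) := by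
  obtain ⟨j', rfl⟩ : ∃ j', j = j' + 1 := ⟨j - 1, by omega⟩
  obtain ⟨i', rfl⟩ : ∃ i', i = i' + 1 := ⟨i - 1, by omega⟩
  simp only [pvCell, Nat.add_sub_cancel]
  have h1 : i' + 1 + (j' + 1) = (i' + 1 + j') + 1 := by omega
  have h2 : i' + (j' + 1) = i' + 1 + j' := by omega
  rw [h1, h2, Nat.choose_succ_succ]
  push_cast
  ring

-- multiplicative step: cell (j, k) = cell (j, k-1) * (k + j) // k  (exact division)
theorem pvCell_step (n : Int) (j k : Nat) (hk : 1 ≤ k) :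
    PySem.Int.floordiv (pvCell n j (k - 1) * ((k : Int) + (j : Int))) (k : Int) = pvCell n j k := by
  obtain ⟨k', rfl⟩ : ∃ k', k = k' + 1 := ⟨k - 1, by omega⟩
  simp only [pvCell, Nat.add_sub_cancel]
  have hid := Nat.add_one_mul_choose_eq (k' + j) k'
  have hpos : (0:Int) < ((k' + 1 : Nat) : Int) := by exact_mod_cast Nat.succ_pos k'
  rw [PySem.Int.floordiv_eq_ediv_of_pos hpos]
  have hmul : n * ((k' + j).choose k' : Int) * (((k' + 1 : Nat) : Int) + (j : Int))
      = n * (((k' + 1 + j).choose (k' + 1) : Int)) * ((k' + 1 : Nat) : Int) := by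
    have h2 : (k' + j + 1) * (k' + j).choose k' = (k' + 1 + j).choose (k' + 1) * (k' + 1) := by
      have h3 : k' + j + 1 = k' + 1 + j := by omega
      simpa [Nat.succ_eq_add_one, h3] using hid
    have hc : ((k' + j + 1) * (k' + j).choose k' : Int) = (((k' + 1 + j).choose (k' + 1) * (k' + 1) : Nat) : Int) := by
      exact_mod_cast h2
    push_cast at hc ⊢
    linear_combination n * hc
  rw [hmul, Int.mul_ediv_cancel _ (ne_of_gt hpos)]

-- B-side row characterisation
theorem alt_row (n : Int) (j : Nat) (k : Nat) (hk : 1 ≤ k) :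
    ((PySem.List.pyRange 1 (k : Int) 1).foldl
      (fun (st : List Int × Int) x =>
        let v := PySem.Int.floordiv (st.2 * (x + (j : Int))) x
        (st.1 ++ [v], v))
      ([n], n)) = ((List.range k).map (pvCell n j), pvCell n j (k - 1)) := by
  induction k with
  | zero => omega
  | succ k ih =>
    rcases Nat.eq_zero_or_pos k with rfl | hk'
    · simp [PySem.List.pyRange_one_eq_nil (by norm_num : (1:Int) ≤ 1), List.range_succ,
        pvCell_zero_right]
    · have hcast : ((k + 1 : Nat) : Int) = (k : Int) + 1 := by push_cast; ring
      have hr : PySem.List.pyRange 1 ((k + 1 : Nat) : Int) 1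
          = PySem.List.pyRange 1 (k : Int) 1 ++ [(k : Int)] := by
        rw [hcast]; exact PySem.List.pyRange_one_succ_right (by exact_mod_cast hk')
      rw [hr, List.foldl_append, ih hk']
      simp only [List.foldl_cons, List.foldl_nil]
      rw [pvCell_step n j k hk']
      simp [List.range_succ]

theorem alt_eq (m : Int) (n : Int) : vierkant_alt m n = (List.range m.toNat).map (pvRow m.toNat n) := by
  unfold vierkant_alt
  rcases (by omega : m ≤ 0 ∨ 0 < m) with hm | hm
  · rw [PySem.List.pyRange_one_eq_nil hm]
    have : m.toNat = 0 := by omega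
    simp [this]
  · have hM : 1 ≤ m.toNat := by omega
    have hmm : m = (m.toNat : Int) := by omega
    have hout : PySem.List.pyRange 0 (m.toNat : Int) 1
        = (List.range m.toNat).map (Nat.cast : Nat → Int) := by
      rw [PySem.List.pyRange_one]
      simp only [sub_zero, Int.toNat_natCast, zero_add]
    rw [hmm, hout, List.map_map]
    simp only [Int.toNat_natCast]
    apply List.map_congr_left
    intro j _
    simp only [Function.comp]
    rw [alt_row n j m.toNat hM]
    rfl

theorem a_inner (M : Nat) (n : Int) (j : Nat) (hj : j < M)
    (results : List (List Int)) (hres : results = (List.range j).map (pvRow M n)) :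
    ∀ I, I ≤ M →
    (List.range I).foldl
      (fun row (i : Nat) =>
        row ++ [if (i : Int) = 0 ∨ (j : Int) = 0 then n
                else PySem.List.pyGetD (PySem.List.pyGetD results ((j : Int) - 1) []) (i : Int) 0
                     + PySem.List.pyGetD row ((i : Int) - 1) 0]) []
      = (List.range I).map (pvCell n j) := by
  intro I
  induction I with
  | zero => intro _; simp
  | succ I ih =>
    intro hI
    rw [List.range_succ, List.foldl_append, ih (by omega), List.foldl_cons, List.foldl_nil,
        List.map_append]
    congr 1
    simp only [List.map_cons, List.map_nil]
    congr 1
    by_cases hI0 : I = 0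
    · subst hI0; simp [pvCell_zero_right]
    · by_cases hj0 : j = 0
      · subst hj0; simp [pvCell_zero_left]
      · have hcond : ¬ ((I : Int) = 0 ∨ (j : Int) = 0) := by
          rintro (h | h)
          · exact hI0 (by exact_mod_cast h)
          · exact hj0 (by exact_mod_cast h)
        rw [if_neg hcond]
        have hj1 : (j : Int) - 1 = ((j - 1 : Nat) : Int) := by omega
        have hi1 : (I : Int) - 1 = ((I - 1 : Nat) : Int) := by omega
        rw [hres, hj1, hi1]
        simp only [PySem.List.pyGetD_natCast]
        have h1 : (List.map (pvRow M n) (List.range j)).getD (j - 1) [] = pvRow M n (j - 1) := by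
          rw [List.getD_eq_getElem _ _ (by simpa using (by omega : j - 1 < j))]
          simp
        have h2 : (pvRow M n (j - 1)).getD I 0 = pvCell n (j - 1) I := by
          unfold pvRow
          rw [List.getD_eq_getElem _ _ (by simpa using (by omega : I < M))]
          simp
        have h3 : (List.map (pvCell n j) (List.range I)).getD (I - 1) 0 = pvCell n j (I - 1) := by
          rw [List.getD_eq_getElem _ _ (by simpa using (by omega : I - 1 < I))]
          simp
        rw [h1, h2, h3]
        exact (pvCell_pascal n j I (by omega) (by omega)).symm

theorem a_outer (M : Nat) (n : Int) : ∀ J, J ≤ M →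
    (List.range J).foldl
      (fun results (j : Nat) =>
        results ++ [(List.range M).foldl
          (fun row (i : Nat) =>
            row ++ [if (i : Int) = 0 ∨ (j : Int) = 0 then n
                    else PySem.List.pyGetD (PySem.List.pyGetD results ((j : Int) - 1) []) (i : Int) 0
                         + PySem.List.pyGetD row ((i : Int) - 1) 0]) []]) []
      = (List.range J).map (pvRow M n) := by
  intro J
  induction J with
  | zero => intro _; simp
  | succ J ih =>
    intro hJ
    rw [List.range_succ, List.foldl_append, ih (by omega), List.foldl_cons, List.foldl_nil,
        List.map_append]
    congr 1
    simp only [List.map_cons, List.map_nil]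
    congr 1
    rw [a_inner M n J (by omega) _ rfl M (le_refl M)]
    rfl

theorem a_eq (m : Int) (n : Int) : vierkant m n = (List.range m.toNat).map (pvRow m.toNat n) := by
  unfold vierkant
  rcases (by omega : m ≤ 0 ∨ 0 < m) with hm | hm
  · rw [PySem.List.pyRange_one_eq_nil hm]
    have : m.toNat = 0 := by omega
    simp [this]
  · have hmm : m = (m.toNat : Int) := by omega
    have hout : PySem.List.pyRange 0 (m.toNat : Int) 1
        = (List.range m.toNat).map (Nat.cast : Nat → Int) := by
      rw [PySem.List.pyRange_one]
      simp only [sub_zero, Int.toNat_natCast, zero_add]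
    rw [hmm, hout]
    simp only [List.foldl_map]
    exact a_outer m.toNat n m.toNat (le_refl _)

-- ===== VERDICT (by name: the statement is the Claim_ definition above) =====
theorem vierkant_spec : Claim_equal_vierkant := by
  intro m n _
  unfold Spec_vierkant
  rw [a_eq, alt_eq]
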